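-- pv_equiv track=rewrite | github.com/LKONDETI/codepath-sept-nov2024 | unit2_session2.py | prioritize_observations
-- ===== SOURCE A (Python) =====
-- def prioritize_observations(observed_species, priority_species):
--
--     priority_count = {species: 0 for species in priority_species}
--     remaining_species = []
--
--     for species in observed_species:
--         if species in priority_count:
--             priority_count[species] += 1
--         else:
--             remaining_species.append(species)
--
--
--     result = []
--     for species in priority_species:
--         result.extend([species] * priority_count[species])
--
--
--     result.extend(sorted(remaining_species))
--
--     return result
-- ===== SOURCE B (Python) =====
-- def prioritize_observations(observed_species, priority_species):
--     # Per-priority rescan: for each priority entry, pull its matching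
--     # observations directly; then sort what matched no priority entry.
--     return [s for p in priority_species for s in observed_species if s == p] + \
--            sorted(s for s in observed_species if s not in priority_species)
-- ===== Notes on version B (the rewrite author's own statement) =====
-- stated objective: simpler
-- what changed: Drops A's count table entirely: instead of tallying observations into a zero-initialised priority dict and replaying the counts, B rescans the observation list once per priority entry to emit the matches directly, and computes the leftover as a plain list-membership filter followed by sort.
import Mathlib
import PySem

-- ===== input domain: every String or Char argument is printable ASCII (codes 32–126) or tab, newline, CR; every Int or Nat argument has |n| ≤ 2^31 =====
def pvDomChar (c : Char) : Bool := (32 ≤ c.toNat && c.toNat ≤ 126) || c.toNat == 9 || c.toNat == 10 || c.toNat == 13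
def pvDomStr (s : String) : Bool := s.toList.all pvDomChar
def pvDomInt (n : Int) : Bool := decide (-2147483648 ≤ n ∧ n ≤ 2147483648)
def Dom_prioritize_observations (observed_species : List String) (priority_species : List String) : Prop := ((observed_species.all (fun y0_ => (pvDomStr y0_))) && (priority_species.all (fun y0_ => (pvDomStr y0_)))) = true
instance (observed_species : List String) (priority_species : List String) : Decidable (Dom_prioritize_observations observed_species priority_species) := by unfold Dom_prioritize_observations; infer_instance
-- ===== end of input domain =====

-- B drops A's count table: it rescans the observations once per priority entry to emit matches, then filters and sorts the leftovers; objective: simpler.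

-- ===== PORT A =====
def prioritize_observations (observed_species : List String) (priority_species : List String) : List String :=
  let priority_count : PySem.Dict String Int :=
    priority_species.foldl (fun d species => d.insert species 0) PySem.Dict.empty
  let st :=
    observed_species.foldl
      (fun (st : PySem.Dict String Int × List String) species =>
        if st.1.contains species then (st.1.modify species 0 (· + 1), st.2)
        else (st.1, st.2 ++ [species]))
      (priority_count, [])
  let result :=
    priority_species.foldl
      (fun r species => r ++ PySem.List.pyRepeat [species] (st.1.getD species 0)) []
  result ++ PySem.List.sorted st.2 (fun x => x) false

-- ===== PORT B =====
def prioritize_observations_alt (observed_species : List String) (priority_species : List String) : List String :=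
  (priority_species.flatMap (fun p => observed_species.filter (fun s => s == p)))
    ++ PySem.List.sorted
        (observed_species.filter (fun s => !(decide (s ∈ priority_species)))) (fun x => x) false

-- ===== PRECONDITION & SPEC =====
def Spec_prioritize_observations (observed_species : List String) (priority_species : List String) (out : List String) : Prop := out = prioritize_observations_alt observed_species priority_species
instance (observed_species : List String) (priority_species : List String) (out : List String) : Decidable (Spec_prioritize_observations observed_species priority_species out) := by unfold Spec_prioritize_observations; infer_instance

-- ===== CLAIM (what is proved, stated in full; the proofs are below) =====
def Claim_equal_prioritize_observations : Prop := ∀ (observed_species : List String) (priority_species : List String), Dom_prioritize_observations observed_species priority_species → Spec_prioritize_observations observed_species priority_species (prioritize_observations observed_species priority_species)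

-- ===== LEMMAS AND PROOFS =====

-- the zero-initialising dict comprehension: every lookup with default 0 gives 0
lemma getD_init (l : List String) (d : PySem.Dict String Int) (s : String)
    (h : d.getD s 0 = 0) :
    (l.foldl (fun d x => d.insert x 0) d).getD s 0 = 0 := by
  induction l generalizing d with
  | nil => simpa using h
  | cons x t ih =>
    simp only [List.foldl_cons]
    exact ih _ (by rw [PySem.Dict.getD_insert]; split <;> simp [h])

-- membership in the zero-initialised dict is membership in priority_species
lemma contains_init (l : List String) (s : String) :
    (l.foldl (fun d x => d.insert x (0:Int)) PySem.Dict.empty).contains s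
      = decide (s ∈ l) := by
  rw [PySem.Dict.contains_eq_decide_mem_keys, PySem.Dict.keys_foldl_insert]
  simp [PySem.Dict.keys_empty, PySem.Set.update_nil_left, PySem.Set.mem_ofList]

-- A's fused partition loop, split into its two independent components
lemma pair_loop (obs : List String) (d : PySem.Dict String Int) (rem : List String)
    (p : String → Bool) (hp : ∀ s, d.contains s = p s) :
    obs.foldl
      (fun (st : PySem.Dict String Int × List String) species =>
        if st.1.contains species then (st.1.modify species 0 (· + 1), st.2)
        else (st.1, st.2 ++ [species]))
      (d, rem)
    = ((obs.filter p).foldl (fun d x => d.modify x 0 (· + 1)) d,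
       rem ++ obs.filter (fun s => !p s)) := by
  induction obs generalizing d rem with
  | nil => simp
  | cons x t ih =>
    simp only [List.foldl_cons, List.filter_cons]
    by_cases hx : p x = true
    · have hdx : d.contains x = true := by rw [hp]; exact hx
      have hcontains : ∀ s, (d.modify x 0 (· + 1)).contains s = p s := by
        intro s
        rw [PySem.Dict.contains_modify, ← hp s]
        by_cases hsx : s = x <;> simp [hsx, hdx]
      simp only [hdx, if_pos, hx]
      rw [ih _ _ hcontains]
      simp
    · have hdx : d.contains x = false := by rw [hp]; simpa using hx
      simp only [hdx, Bool.false_eq_true, if_false]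
      rw [ih _ _ hp]
      simp [hx]

-- filtering for equality with one value yields that value, count-many times
lemma filter_eq_replicate_count (l : List String) (a : String) :
    l.filter (fun s => s == a) = List.replicate (l.count a) a := by
  induction l with
  | nil => simp
  | cons x t ih =>
    by_cases h : x = a
    · simp [h, ih, List.replicate_succ]
    · simp [h, ih]

-- ===== VERDICT (by name: the statement is the Claim_ definition above) =====
theorem prioritize_observations_spec : Claim_equal_prioritize_observations := by
  intro obs prio _
  unfold Spec_prioritize_observations prioritize_observations prioritize_observations_alt
  simp only []
  set d0 := prio.foldl (fun d x => d.insert x (0:Int)) PySem.Dict.empty with hd0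
  have hc0 : ∀ s, d0.contains s = decide (s ∈ prio) := fun s => contains_init prio s
  rw [pair_loop obs d0 [] _ hc0]
  simp only [List.nil_append]
  congr 1
  · -- the priority part: replayed tally = per-priority rescan
    rw [PySem.List.foldl_append_eq_flatMap, List.nil_append]
    apply List.flatMap_congr
    intro s hs
    rw [PySem.Dict.getD_foldl_modify_add_one,
      getD_init prio PySem.Dict.empty s (by simp [PySem.Dict.getD_empty]),
      List.count_filter (by simpa using hs),
      PySem.List.pyRepeat_singleton, filter_eq_replicate_count]
    congr 1
    omega
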